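-- pv_equiv track=rewrite | github.com/featherfeet/oliver-risc | toolchain/compiler/syntaxparser.py | getTopLevelChildren
-- ===== SOURCE A (Python) =====
-- def getTopLevelChildren(tokens):
-- 	"""Get all direct children of the s-expression represented in a list of tokens."""
-- 	tokens.pop(0)
-- 	tokens.pop()
-- 	ret = []
-- 	paren_counter = 0
-- 	for token in tokens:
-- 		if paren_counter == 0:
-- 			ret.append([])
-- 		if token == '(':
-- 			ret[-1].append(token)
-- 			paren_counter += 1
-- 		elif token == ')':
-- 			paren_counter -= 1
-- 			ret[-1].append(token)
-- 		else:
-- 			ret[-1].append(token)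
-- 	return ret
-- ===== SOURCE B (Python) =====
-- def getTopLevelChildren(tokens):
-- 	"""Get all direct children of the s-expression represented in a list of tokens."""
-- 	tokens.pop(0)
-- 	tokens.pop()
-- 	# Phase 1: record every index whose paren depth *before* the token is 0
-- 	# (these are exactly the positions where a new top-level child begins).
-- 	bounds = []
-- 	depth = 0
-- 	i = 0
-- 	for token in tokens:
-- 		if depth == 0:
-- 			bounds.append(i)
-- 		if token == '(':
-- 			depth += 1
-- 		elif token == ')':
-- 			depth -= 1
-- 		i += 1
-- 	# Phase 2: partition the token list by slicing between consecutive boundaries.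
-- 	return [tokens[s:e] for s, e in zip(bounds, bounds[1:] + [len(tokens)])]
-- ===== Notes on version B (the rewrite author's own statement) =====
-- stated objective: alternative
-- what changed: Replaces the grow-as-you-go accumulation into ret[-1] by a two-phase decomposition: first compute the list of indices whose pre-token paren depth is 0 (group-start boundaries), then partition the token list by slicing between consecutive boundaries.
import Mathlib
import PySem

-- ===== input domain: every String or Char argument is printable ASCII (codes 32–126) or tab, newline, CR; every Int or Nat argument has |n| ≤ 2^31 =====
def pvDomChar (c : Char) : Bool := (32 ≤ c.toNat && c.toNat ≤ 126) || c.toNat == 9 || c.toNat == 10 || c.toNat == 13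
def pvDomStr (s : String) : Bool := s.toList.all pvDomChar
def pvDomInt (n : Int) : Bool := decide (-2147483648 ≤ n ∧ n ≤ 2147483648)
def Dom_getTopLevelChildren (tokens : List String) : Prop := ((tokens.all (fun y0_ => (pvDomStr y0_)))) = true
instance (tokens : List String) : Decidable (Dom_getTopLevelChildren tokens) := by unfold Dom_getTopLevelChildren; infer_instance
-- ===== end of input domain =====

-- B replaces A's grow-as-you-go group accumulation by a two-phase decomposition (find depth-0
-- boundary indices, then partition by slicing); both mutate the argument by the same two pops,
-- the proved equivalence is about the return value.


-- ===== PORT A =====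
-- ret[-1].append(token): append token to the last group (total; the loop only calls it with ret ≠ [])
def pyAppendLast (xs : List (List String)) (t : String) : List (List String) :=
  match xs with
  | [] => []
  | [g] => [g ++ [t]]
  | g :: rest => g :: pyAppendLast rest t

def getTopLevelChildren (tokens : List String) : List (List String) :=
  -- tokens.pop(0); tokens.pop() : drop the first and last element (IndexError when len < 2 → Pre_)
  let ts := (tokens.drop 1).dropLast
  (ts.foldl
    (fun (st : List (List String) × Int) (token : String) =>
      let ret := if st.2 = 0 then st.1 ++ [[]] else st.1
      if token = "(" then (pyAppendLast ret token, st.2 + 1)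
      else if token = ")" then (pyAppendLast ret token, st.2 - 1)
      else (pyAppendLast ret token, st.2))
    ([], 0)).1

-- ===== PORT B =====
def getTopLevelChildren_alt (tokens : List String) : List (List String) :=
  -- tokens.pop(0); tokens.pop() : same two pops as A (IndexError when len < 2 → Pre_)
  let ts := (tokens.drop 1).dropLast
  -- phase 1: boundary indices (state = (bounds, depth, i); i : Nat since it counts 0,1,2,…)
  let bounds := (ts.foldl
    (fun (st : List Nat × Int × Nat) (token : String) =>
      ((if st.2.1 = 0 then st.1 ++ [st.2.2] else st.1),
       (if token = "(" then st.2.1 + 1 else if token = ")" then st.2.1 - 1 else st.2.1),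
       st.2.2 + 1))
    ([], 0, 0)).1
  -- phase 2: [tokens[s:e] for s, e in zip(bounds, bounds[1:] + [len(tokens)])];
  -- tokens[s:e] for 0 ≤ s, e is exactly (take e).drop s (Python clamps nonnegative slice bounds as take/drop do)
  (bounds.zip (bounds.drop 1 ++ [ts.length])).map (fun p => (ts.take p.2).drop p.1)

-- ===== PRECONDITION & SPEC =====
-- Pre_ excludes exactly the inputs with fewer than 2 tokens, on which A's tokens.pop(0)/tokens.pop()
-- raises IndexError (B raises identically there).
def Pre_getTopLevelChildren (tokens : List String) : Prop := 2 ≤ tokens.length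
instance (tokens : List String) : Decidable (Pre_getTopLevelChildren tokens) := by unfold Pre_getTopLevelChildren; infer_instance
def pvWitness_getTopLevelChildren : List String := ["(", "a", "(", "b", ")", "c", ")"]

def Spec_getTopLevelChildren (tokens : List String) (out : List (List String)) : Prop := out = getTopLevelChildren_alt tokens
instance (tokens : List String) (out : List (List String)) : Decidable (Spec_getTopLevelChildren tokens out) := by unfold Spec_getTopLevelChildren; infer_instance

-- ===== CLAIM (what is proved, stated in full; the proofs are below) =====
def Claim_equal_getTopLevelChildren : Prop := ∀ (tokens : List String), Dom_getTopLevelChildren tokens → Pre_getTopLevelChildren tokens → Spec_getTopLevelChildren tokens (getTopLevelChildren tokens)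

-- ===== LEMMAS AND PROOFS =====

-- partition at cut positions (recursive form of B's phase-2 comprehension)
def pvSlicesAt (ts : List String) : List Nat → List (List String)
  | [] => []
  | [s] => [ts.drop s]
  | s :: e :: rest => (ts.take e).drop s :: pvSlicesAt ts (e :: rest)

-- token's contribution to the paren depth
def pvDelta (t : String) : Int := if t = "(" then 1 else if t = ")" then -1 else 0

-- canonical grouping: a new group starts exactly where the pre-token depth is 0
def pvGroups : Int → List String → List (List String)
  | _, [] => []
  | d, t :: ts =>
    if d + pvDelta t = 0 then [t] :: pvGroups (d + pvDelta t) ts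
    else match pvGroups (d + pvDelta t) ts with
         | [] => [[t]]
         | h :: r => (t :: h) :: r

-- boundary positions of a partition: 0, |g₀|, |g₀|+|g₁|, …
def pvSums : List (List String) → List Nat
  | [] => []
  | h :: r => 0 :: (pvSums r).map (· + h.length)

-- same, but the head group is the continuation of an open group (no boundary at 0)
def pvTail (P : List (List String)) : List Nat :=
  match P with | [] => [] | h :: r => (pvSums r).map (· + h.length)

-- recursive form of B's phase-1 loop, start index i, start depth d
def pvBnds (i : Nat) (d : Int) : List String → List Nat
  | [] => []
  | t :: ts => (if d = 0 then [i] else []) ++ pvBnds (i + 1) (d + pvDelta t) ts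

def pvStepA : (List (List String) × Int) → String → (List (List String) × Int) :=
  fun st token =>
    let ret := if st.2 = 0 then st.1 ++ [[]] else st.1
    if token = "(" then (pyAppendLast ret token, st.2 + 1)
    else if token = ")" then (pyAppendLast ret token, st.2 - 1)
    else (pyAppendLast ret token, st.2)

def pvStepB : (List Nat × Int × Nat) → String → (List Nat × Int × Nat) :=
  fun st token =>
    ((if st.2.1 = 0 then st.1 ++ [st.2.2] else st.1),
     (if token = "(" then st.2.1 + 1 else if token = ")" then st.2.1 - 1 else st.2.1),
     st.2.2 + 1)

lemma stepA_eq (st : List (List String) × Int) (t : String) :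
    pvStepA st t = (pyAppendLast (if st.2 = 0 then st.1 ++ [[]] else st.1) t, st.2 + pvDelta t) := by
  simp only [pvStepA, pvDelta]
  split_ifs <;> simp [Int.sub_eq_add_neg]

lemma stepB_eq (st : List Nat × Int × Nat) (t : String) :
    pvStepB st t = ((if st.2.1 = 0 then st.1 ++ [st.2.2] else st.1), st.2.1 + pvDelta t, st.2.2 + 1) := by
  simp only [pvStepB, pvDelta]
  split_ifs <;> simp [Int.sub_eq_add_neg]

lemma pyAppendLast_append (xs : List (List String)) (y : List String) (t : String) :
    pyAppendLast (xs ++ [y]) t = xs ++ [y ++ [t]] := by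
  induction xs with
  | nil => rfl
  | cons x xs ih =>
    cases xs with
    | nil => simp [pyAppendLast]
    | cons x2 xs2 => simpa [pyAppendLast] using ih

lemma foldA_char (ts : List String) : ∀ (xs : List (List String)) (y : List String) (d : Int),
    (List.foldl pvStepA (xs ++ [y], d) ts).1 =
      if d = 0 then xs ++ (y :: pvGroups d ts)
      else match pvGroups d ts with
           | [] => xs ++ [y]
           | h :: r => xs ++ ((y ++ h) :: r) := by
  induction ts with
  | nil => intro xs y d; split_ifs <;> simp [pvGroups]
  | cons t ts ih =>
    intro xs y d
    rw [List.foldl_cons, stepA_eq]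
    by_cases hd : d = 0
    · rw [if_pos hd, if_pos hd,
        show xs ++ [y] ++ [[]] = (xs ++ [y]) ++ [([] : List String)] from by simp,
        pyAppendLast_append, List.nil_append, ih (xs ++ [y]) [t] (d + pvDelta t)]
      simp only [pvGroups]
      by_cases hd' : d + pvDelta t = 0
      · rw [if_pos hd', if_pos hd']
        simp
      · rw [if_neg hd', if_neg hd']
        cases hg : pvGroups (d + pvDelta t) ts with
        | nil => simp
        | cons h r => simp
    · rw [if_neg hd, if_neg hd, pyAppendLast_append, ih xs (y ++ [t]) (d + pvDelta t)]
      simp only [pvGroups]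
      by_cases hd' : d + pvDelta t = 0
      · rw [if_pos hd', if_pos hd']
      · rw [if_neg hd', if_neg hd']
        cases hg : pvGroups (d + pvDelta t) ts with
        | nil => simp
        | cons h r => simp

lemma A_eq_groups (ts : List String) :
    (List.foldl pvStepA ([], 0) ts).1 = pvGroups 0 ts := by
  cases ts with
  | nil => rfl
  | cons t ts =>
    rw [List.foldl_cons, stepA_eq, if_pos rfl, List.nil_append,
      show pyAppendLast [[]] t = [] ++ [[t]] from rfl,
      foldA_char ts [] [t] (0 + pvDelta t)]
    simp only [pvGroups, zero_add]
    by_cases hd' : pvDelta t = 0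
    · rw [if_pos hd', if_pos hd']
      simp
    · rw [if_neg hd', if_neg hd']
      cases hg : pvGroups (pvDelta t) ts with
      | nil => simp
      | cons h r => simp

lemma foldB_bnds (ts : List String) : ∀ (bs : List Nat) (d : Int) (i : Nat),
    (List.foldl pvStepB (bs, d, i) ts).1 = bs ++ pvBnds i d ts := by
  induction ts with
  | nil => intro bs d i; simp [pvBnds]
  | cons t ts ih =>
    intro bs d i
    rw [List.foldl_cons, stepB_eq, ih]
    simp only [pvBnds]
    split_ifs <;> simp

lemma map_add_add (l : List Nat) (a b : Nat) :
    (l.map (· + a)).map (· + b) = l.map (· + (a + b)) := by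
  rw [List.map_map]
  exact List.map_congr_left (fun x _ => by simp [Function.comp]; omega)

lemma bnds_eq_sums (ts : List String) : ∀ (i : Nat) (d : Int),
    pvBnds i d ts =
      (if d = 0 then pvSums (pvGroups d ts) else pvTail (pvGroups d ts)).map (· + i) := by
  induction ts with
  | nil => intro i d; split_ifs <;> simp [pvBnds, pvGroups, pvSums, pvTail]
  | cons t ts ih =>
    intro i d
    simp only [pvBnds, ih (i + 1) (d + pvDelta t), pvGroups]
    by_cases hd' : d + pvDelta t = 0
    · rw [if_pos hd', if_pos hd']
      by_cases hd : d = 0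
      · rw [if_pos hd, if_pos hd]
        simp only [List.nil_append, pvSums, List.map_cons, List.length_singleton,
          map_add_add, List.cons_append]
        rw [Nat.add_comm 1 i]
        simp
      · rw [if_neg hd, if_neg hd]
        simp only [List.nil_append, pvTail, List.length_singleton, map_add_add]
        rw [Nat.add_comm 1 i]
    · rw [if_neg hd', if_neg hd']
      cases hg : pvGroups (d + pvDelta t) ts with
      | nil =>
        by_cases hd : d = 0 <;>
          simp [hd, pvSums, pvTail]
      | cons h r =>
        by_cases hd : d = 0
        · rw [if_pos hd, if_pos hd]
          simp only [pvTail, pvSums, List.map_cons, List.length_cons, map_add_add,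
            List.cons_append, List.nil_append]
          rw [show h.length + 1 + i = h.length + (1 + i) by omega, Nat.add_comm 1 i]
          simp
        · rw [if_neg hd, if_neg hd]
          simp only [pvTail, List.length_cons, map_add_add]
          rw [show h.length + 1 + i = h.length + (1 + i) by omega, Nat.add_comm 1 i]
          simp

lemma slicesAt_shift (h ts : List String) : ∀ (bs : List Nat),
    pvSlicesAt (h ++ ts) (bs.map (· + h.length)) = pvSlicesAt ts bs := by
  intro bs
  induction bs with
  | nil => rfl
  | cons s rest ih =>
    cases rest with
    | nil => simp [pvSlicesAt, List.drop_append]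
    | cons e rest2 =>
      simp only [List.map_cons, pvSlicesAt]
      refine congrArg₂ List.cons ?_ ?_
      · simp [List.take_append, List.drop_append]
      · simpa using ih

lemma slicesAt_sums (P : List (List String)) :
    pvSlicesAt P.flatten (pvSums P) = P := by
  induction P with
  | nil => rfl
  | cons h r ih =>
    cases r with
    | nil => simp [pvSums, pvSlicesAt]
    | cons h2 r2 =>
      simp only [pvSums, List.map_cons, Nat.zero_add, List.flatten_cons, pvSlicesAt]
      refine congrArg₂ List.cons ?_ ?_
      · simp
      · have h1 : (pvSums (h2 :: r2)).map (· + h.length) =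
            h.length :: ((pvSums r2).map (· + h2.length)).map (· + h.length) := by
          simp [pvSums]
        rw [← h1, slicesAt_shift h (h2 ++ r2.flatten) (pvSums (h2 :: r2))]
        simpa using ih

lemma groups_flatten (ts : List String) : ∀ (d : Int), (pvGroups d ts).flatten = ts := by
  induction ts with
  | nil => intro d; rfl
  | cons t ts ih =>
    intro d
    simp only [pvGroups]
    by_cases hd' : d + pvDelta t = 0
    · rw [if_pos hd']
      simp [ih]
    · rw [if_neg hd']
      cases hg : pvGroups (d + pvDelta t) ts with
      | nil =>
        have : ts = [] := by rw [← ih (d + pvDelta t), hg]; rfl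
        simp [this]
      | cons h r =>
        have hts : (h :: r).flatten = ts := by rw [← hg]; exact ih _
        simp only [List.flatten_cons] at hts ⊢
        simp [← hts]

lemma zip_slices (ts : List String) : ∀ (bs : List Nat),
    (bs.zip (bs.drop 1 ++ [ts.length])).map (fun p => (ts.take p.2).drop p.1) =
      pvSlicesAt ts bs := by
  intro bs
  induction bs with
  | nil => rfl
  | cons s rest ih =>
    cases rest with
    | nil => simp [pvSlicesAt, List.take_length]
    | cons e rest2 =>
      simp only [List.drop_one, List.tail_cons, List.cons_append, List.zip_cons_cons,
        List.map_cons, pvSlicesAt]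
      refine congrArg₂ List.cons rfl ?_
      simpa [List.drop_one] using ih

lemma B_eq_groups (ts : List String) :
    pvSlicesAt ts ((List.foldl pvStepB ([], 0, 0) ts).1) = pvGroups 0 ts := by
  rw [foldB_bnds, List.nil_append, bnds_eq_sums, if_pos rfl]
  obtain ⟨G, hGdef⟩ : ∃ G, pvGroups 0 ts = G := ⟨_, rfl⟩
  rw [hGdef, show (pvSums G).map (· + 0) = pvSums G from by simp,
    show ts = G.flatten from (hGdef ▸ groups_flatten ts 0).symm]
  exact slicesAt_sums G

-- ===== VERDICT (by name: the statement is the Claim_ definition above) =====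
theorem getTopLevelChildren_spec : Claim_equal_getTopLevelChildren := by
  intro tokens _ _
  unfold Spec_getTopLevelChildren getTopLevelChildren getTopLevelChildren_alt
  rw [show (fun (st : List (List String) × Int) (token : String) =>
      let ret := if st.2 = 0 then st.1 ++ [[]] else st.1
      if token = "(" then (pyAppendLast ret token, st.2 + 1)
      else if token = ")" then (pyAppendLast ret token, st.2 - 1)
      else (pyAppendLast ret token, st.2)) = pvStepA from rfl]
  rw [show (fun (st : List Nat × Int × Nat) (token : String) =>
      ((if st.2.1 = 0 then st.1 ++ [st.2.2] else st.1),
       (if token = "(" then st.2.1 + 1 else if token = ")" then st.2.1 - 1 else st.2.1),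
       st.2.2 + 1)) = pvStepB from rfl]
  rw [A_eq_groups, zip_slices, B_eq_groups]
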